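-- pv_equiv track=rewrite | github.com/rand/cc-experiments | skills/typed-holes-refactor/scripts/holes_to_beads.py | _categorize_hole
-- ===== SOURCE A (Python) =====
-- def _categorize_hole(hole_id: str) -> str:
--     """Categorize hole by prefix"""
--     if hole_id.startswith('H0_'):
--         return 'current_state'
--     elif hole_id.startswith('R'):
--         if any(hole_id.startswith(f'R{i}_') for i in [1, 2, 3]):
--             return 'architecture'
--         elif any(hole_id.startswith(f'R{i}_') for i in [4, 5, 6]):
--             return 'implementation'
--         elif any(hole_id.startswith(f'R{i}_') for i in [7, 8, 9]):
--             return 'quality'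
--         else:
--             return 'refactor'
--     elif hole_id.startswith('M'):
--         return 'migration'
--     return 'unknown'
-- ===== SOURCE B (Python) =====
-- _TABLE = [
--     ('H0_', 'current_state'),
--     ('R1_', 'architecture'), ('R2_', 'architecture'), ('R3_', 'architecture'),
--     ('R4_', 'implementation'), ('R5_', 'implementation'), ('R6_', 'implementation'),
--     ('R7_', 'quality'), ('R8_', 'quality'), ('R9_', 'quality'),
--     ('R', 'refactor'),
--     ('M', 'migration'),
-- ]
--
--
-- def _categorize_hole(hole_id: str) -> str:
--     for prefix, category in _TABLE:
--         if hole_id.startswith(prefix):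
--             return category
--     return 'unknown'
-- ===== Notes on version B (the rewrite author's own statement) =====
-- stated objective: simpler
-- what changed: Replaced the nested if/elif cascade with any() generators by a single ordered (prefix, category) table scanned once with startswith; ordering (H0_ first, R1_-R9_ before bare 'R') preserves behaviour.
import Mathlib
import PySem

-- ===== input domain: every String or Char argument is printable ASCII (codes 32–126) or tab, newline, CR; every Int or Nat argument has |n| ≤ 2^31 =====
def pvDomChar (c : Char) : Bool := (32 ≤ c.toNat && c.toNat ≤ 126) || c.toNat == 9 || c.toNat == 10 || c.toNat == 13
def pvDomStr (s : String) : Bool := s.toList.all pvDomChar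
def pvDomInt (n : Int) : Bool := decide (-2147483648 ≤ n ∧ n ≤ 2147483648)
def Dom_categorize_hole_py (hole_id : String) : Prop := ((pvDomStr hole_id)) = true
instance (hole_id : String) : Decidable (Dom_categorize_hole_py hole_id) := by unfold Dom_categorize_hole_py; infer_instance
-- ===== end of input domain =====

-- B replaces A's nested if/elif cascade with a single ordered (prefix, category) table
-- scanned once; objective: simpler. Return-value equivalence; no side effects involved.

-- ===== PORT A =====
def categorize_hole_py (hole_id : String) : String :=
  if PySem.Str.startswith hole_id "H0_" then "current_state"
  else if PySem.Str.startswith hole_id "R" then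
    if ([1, 2, 3] : List Int).any
        (fun i => PySem.Str.startswith hole_id ("R" ++ PySem.Int.toStr i ++ "_")) then
      "architecture"
    else if ([4, 5, 6] : List Int).any
        (fun i => PySem.Str.startswith hole_id ("R" ++ PySem.Int.toStr i ++ "_")) then
      "implementation"
    else if ([7, 8, 9] : List Int).any
        (fun i => PySem.Str.startswith hole_id ("R" ++ PySem.Int.toStr i ++ "_")) then
      "quality"
    else "refactor"
  else if PySem.Str.startswith hole_id "M" then "migration"
  else "unknown"

-- ===== PORT B =====
def pvTable : List (String × String) :=
  [("H0_", "current_state"),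
   ("R1_", "architecture"), ("R2_", "architecture"), ("R3_", "architecture"),
   ("R4_", "implementation"), ("R5_", "implementation"), ("R6_", "implementation"),
   ("R7_", "quality"), ("R8_", "quality"), ("R9_", "quality"),
   ("R", "refactor"),
   ("M", "migration")]

def pvScan (hole_id : String) : List (String × String) → String
  | [] => "unknown"
  | (prefix_, category) :: rest =>
      if PySem.Str.startswith hole_id prefix_ then category
      else pvScan hole_id rest

def categorize_hole_py_alt (hole_id : String) : String :=
  pvScan hole_id pvTable

-- ===== PRECONDITION & SPEC =====
def Spec_categorize_hole_py (hole_id : String) (out : String) : Prop := out = categorize_hole_py_alt hole_id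
instance (hole_id : String) (out : String) : Decidable (Spec_categorize_hole_py hole_id out) := by unfold Spec_categorize_hole_py; infer_instance

-- ===== CLAIM (what is proved, stated in full; the proofs are below) =====
def Claim_equal_categorize_hole_py : Prop := ∀ (hole_id : String), Dom_categorize_hole_py hole_id → Spec_categorize_hole_py hole_id (categorize_hole_py hole_id)

-- ===== LEMMAS AND PROOFS =====

-- A list starting with ['R',d,'_'] starts with ['R'].
theorem startswith_R_of_Rd (l p : List Char) (h : PySem.Chars.startswith l p = true)
    (hp : ['R'] <+: p) : PySem.Chars.startswith l ['R'] = true := by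
  rw [PySem.Chars.startswith_iff] at h ⊢
  exact hp.trans h

-- ===== VERDICT (by name: the statement is the Claim_ definition above) =====
theorem categorize_hole_py_spec : Claim_equal_categorize_hole_py := by
  intro s _
  show categorize_hole_py s = categorize_hole_py_alt s
  unfold categorize_hole_py categorize_hole_py_alt pvTable pvScan
  simp only [List.any_cons, List.any_nil, Bool.or_false,
    show ("R" ++ PySem.Int.toStr (1:Int) ++ "_") = "R1_" from by decide,
    show ("R" ++ PySem.Int.toStr (2:Int) ++ "_") = "R2_" from by decide,
    show ("R" ++ PySem.Int.toStr (3:Int) ++ "_") = "R3_" from by decide,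
    show ("R" ++ PySem.Int.toStr (4:Int) ++ "_") = "R4_" from by decide,
    show ("R" ++ PySem.Int.toStr (5:Int) ++ "_") = "R5_" from by decide,
    show ("R" ++ PySem.Int.toStr (6:Int) ++ "_") = "R6_" from by decide,
    show ("R" ++ PySem.Int.toStr (7:Int) ++ "_") = "R7_" from by decide,
    show ("R" ++ PySem.Int.toStr (8:Int) ++ "_") = "R8_" from by decide,
    show ("R" ++ PySem.Int.toStr (9:Int) ++ "_") = "R9_" from by decide]
  by_cases h0 : PySem.Chars.startswith s.toList ['H','0','_'] = true
  · simp [h0]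
  by_cases h1 : PySem.Chars.startswith s.toList ['R','1','_'] = true
  · simp [pvScan, h0, h1, startswith_R_of_Rd s.toList _ h1 (by decide)]
  by_cases h2 : PySem.Chars.startswith s.toList ['R','2','_'] = true
  · simp [pvScan, h0, h1, h2, startswith_R_of_Rd s.toList _ h2 (by decide)]
  by_cases h3 : PySem.Chars.startswith s.toList ['R','3','_'] = true
  · simp [pvScan, h0, h1, h2, h3, startswith_R_of_Rd s.toList _ h3 (by decide)]
  by_cases h4 : PySem.Chars.startswith s.toList ['R','4','_'] = true
  · simp [pvScan, h0, h1, h2, h3, h4, startswith_R_of_Rd s.toList _ h4 (by decide)]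
  by_cases h5 : PySem.Chars.startswith s.toList ['R','5','_'] = true
  · simp [pvScan, h0, h1, h2, h3, h4, h5, startswith_R_of_Rd s.toList _ h5 (by decide)]
  by_cases h6 : PySem.Chars.startswith s.toList ['R','6','_'] = true
  · simp [pvScan, h0, h1, h2, h3, h4, h5, h6, startswith_R_of_Rd s.toList _ h6 (by decide)]
  by_cases h7 : PySem.Chars.startswith s.toList ['R','7','_'] = true
  · simp [pvScan, h0, h1, h2, h3, h4, h5, h6, h7, startswith_R_of_Rd s.toList _ h7 (by decide)]
  by_cases h8 : PySem.Chars.startswith s.toList ['R','8','_'] = true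
  · simp [pvScan, h0, h1, h2, h3, h4, h5, h6, h7, h8, startswith_R_of_Rd s.toList _ h8 (by decide)]
  by_cases h9 : PySem.Chars.startswith s.toList ['R','9','_'] = true
  · simp [pvScan, h0, h1, h2, h3, h4, h5, h6, h7, h8, h9, startswith_R_of_Rd s.toList _ h9 (by decide)]
  by_cases hR : PySem.Chars.startswith s.toList ['R'] = true <;>
    simp [pvScan, h0, h1, h2, h3, h4, h5, h6, h7, h8, h9, hR]
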